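-- pv_equiv track=rewrite | github.com/x-devease/devease-ad-agents-offline | src/ad/generator/orchestrator/material_physics.py | detect_material_from_product
-- ===== SOURCE A (Python) =====
-- from typing import Dict, List, Optional
--
-- def detect_material_from_product(
--     product_name: str,
--     product_context: Dict = None,
-- ) -> List[str]:
--     """
--     Detect material types from product name and context.
--
--     Args:
--         product_name: Name of the product
--         product_context: Additional product information
--
--     Returns:
--         List of detected material types
--
--     Note: This is a simple rule-based detector - not ML-based.
--     """
--     materials = []
--     name_lower = product_name.lower()
--
--     # Simple keyword matching
--     if any(kw in name_lower for kw in ["metal", "aluminum", "steel", "iron", "copper"]):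
--         materials.append("metal")
--     if any(kw in name_lower for kw in ["plastic", "polymer", "acrylic", "polycarbonate"]):
--         materials.append("plastic")
--     if any(kw in name_lower for kw in ["glass", "mirror", "lens", "crystal"]):
--         materials.append("glass")
--     if any(kw in name_lower for kw in ["wood", "bamboo", "timber", "oak", "pine"]):
--         materials.append("wood")
--     if any(kw in name_lower for kw in ["fabric", "cloth", "textile", "cotton", "polyester"]):
--         materials.append("fabric")
--     if any(kw in name_lower for kw in ["ceramic", "porcelain", "pottery", "tile"]):
--         materials.append("ceramic")
--     if any(kw in name_lower for kw in ["rubber", "silicone", "elastic"]):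
--         materials.append("rubber")
--     if any(kw in name_lower for kw in ["leather", "hide", "skin"]):
--         materials.append("leather")
--
--     return materials
-- ===== SOURCE B (Python) =====
-- from typing import Dict, List
--
-- _MATERIAL_TABLE = [
--     ("metal", ["metal", "aluminum", "steel", "iron", "copper"]),
--     ("plastic", ["plastic", "polymer", "acrylic", "polycarbonate"]),
--     ("glass", ["glass", "mirror", "lens", "crystal"]),
--     ("wood", ["wood", "bamboo", "timber", "oak", "pine"]),
--     ("fabric", ["fabric", "cloth", "textile", "cotton", "polyester"]),
--     ("ceramic", ["ceramic", "porcelain", "pottery", "tile"]),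
--     ("rubber", ["rubber", "silicone", "elastic"]),
--     ("leather", ["leather", "hide", "skin"]),
-- ]
--
-- _KEYWORD_TO_LABEL = {kw: label for label, kws in _MATERIAL_TABLE for kw in kws}
-- _MAX_KW_LEN = 13  # len("polycarbonate"), the longest keyword
--
--
-- def detect_material_from_product(
--     product_name: str,
--     product_context: Dict = None,
-- ) -> List[str]:
--     # Text-driven detection: instead of scanning the name once per keyword,
--     # enumerate the name's substrings (bounded by the longest keyword) and
--     # hash-look them up in a keyword->label dict; emit labels in table order.
--     name_lower = product_name.lower()
--     n = len(name_lower)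
--     found = set()
--     for i in range(n):
--         for j in range(i + 1, min(i + _MAX_KW_LEN, n) + 1):
--             label = _KEYWORD_TO_LABEL.get(name_lower[i:j])
--             if label is not None:
--                 found.add(label)
--     return [label for label, _ in _MATERIAL_TABLE if label in found]
-- ===== Notes on version B (the rewrite author's own statement) =====
-- stated objective: alternative
-- what changed: Replaces A's pattern-driven scan (one substring search per keyword, eight hardcoded branches) with a text-driven algorithm: enumerate the lowered name's substrings up to the longest keyword length, hash-look each up in a keyword-to-label dict collecting a set of labels, then emit labels in canonical table order.
import Mathlib
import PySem

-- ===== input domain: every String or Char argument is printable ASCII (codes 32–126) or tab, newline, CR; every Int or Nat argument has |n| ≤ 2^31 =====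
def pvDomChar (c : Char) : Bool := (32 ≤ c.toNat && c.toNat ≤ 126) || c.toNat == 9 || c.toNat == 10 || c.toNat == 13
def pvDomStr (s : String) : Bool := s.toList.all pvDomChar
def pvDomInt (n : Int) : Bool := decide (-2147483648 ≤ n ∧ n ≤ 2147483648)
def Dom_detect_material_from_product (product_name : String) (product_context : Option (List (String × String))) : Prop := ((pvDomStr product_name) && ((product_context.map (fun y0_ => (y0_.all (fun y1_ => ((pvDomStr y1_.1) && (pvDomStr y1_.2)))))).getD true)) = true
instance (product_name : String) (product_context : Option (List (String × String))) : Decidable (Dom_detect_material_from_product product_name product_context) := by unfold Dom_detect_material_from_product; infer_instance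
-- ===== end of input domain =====

-- B detects materials text-driven: it enumerates the lowered name's substrings (bounded by the longest keyword) and looks them up in a keyword->label dict, instead of scanning the name once per keyword; same output, alternative algorithm.


-- ===== PORT A =====
def detect_material_from_product (product_name : String) (product_context : Option (List (String × String))) : List String :=
  let name_lower := PySem.Str.lower product_name
  let materials : List String := []
  let materials := if ["metal", "aluminum", "steel", "iron", "copper"].any (fun kw => PySem.Str.isIn kw name_lower) then materials ++ ["metal"] else materials
  let materials := if ["plastic", "polymer", "acrylic", "polycarbonate"].any (fun kw => PySem.Str.isIn kw name_lower) then materials ++ ["plastic"] else materials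
  let materials := if ["glass", "mirror", "lens", "crystal"].any (fun kw => PySem.Str.isIn kw name_lower) then materials ++ ["glass"] else materials
  let materials := if ["wood", "bamboo", "timber", "oak", "pine"].any (fun kw => PySem.Str.isIn kw name_lower) then materials ++ ["wood"] else materials
  let materials := if ["fabric", "cloth", "textile", "cotton", "polyester"].any (fun kw => PySem.Str.isIn kw name_lower) then materials ++ ["fabric"] else materials
  let materials := if ["ceramic", "porcelain", "pottery", "tile"].any (fun kw => PySem.Str.isIn kw name_lower) then materials ++ ["ceramic"] else materials
  let materials := if ["rubber", "silicone", "elastic"].any (fun kw => PySem.Str.isIn kw name_lower) then materials ++ ["rubber"] else materials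
  let materials := if ["leather", "hide", "skin"].any (fun kw => PySem.Str.isIn kw name_lower) then materials ++ ["leather"] else materials
  materials

-- ===== PORT B =====
-- _MATERIAL_TABLE
def pvTable : List (String × List String) :=
  [("metal", ["metal", "aluminum", "steel", "iron", "copper"]),
   ("plastic", ["plastic", "polymer", "acrylic", "polycarbonate"]),
   ("glass", ["glass", "mirror", "lens", "crystal"]),
   ("wood", ["wood", "bamboo", "timber", "oak", "pine"]),
   ("fabric", ["fabric", "cloth", "textile", "cotton", "polyester"]),
   ("ceramic", ["ceramic", "porcelain", "pottery", "tile"]),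
   ("rubber", ["rubber", "silicone", "elastic"]),
   ("leather", ["leather", "hide", "skin"])]

-- the pairs produced by the dict comprehension {kw: label for label, kws in _MATERIAL_TABLE for kw in kws}
def pvPairs : List (String × String) := pvTable.flatMap (fun p => p.2.map (fun kw => (kw, p.1)))

-- _KEYWORD_TO_LABEL
def pvKwToLabel : PySem.Dict String String := PySem.Dict.ofList pvPairs

-- the double loop building 'found' (_MAX_KW_LEN = 13)
def pvFound (name_lower : String) : PySem.Set String :=
  let n := PySem.Str.len name_lower
  (PySem.List.pyRange 0 n).foldl (fun acc i =>
    (PySem.List.pyRange (i + 1) (min (i + 13) n + 1)).foldl (fun acc j =>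
      match PySem.Dict.get? pvKwToLabel (PySem.Str.slice name_lower (some i) (some j)) with
      | some label => PySem.Set.add acc label
      | none => acc) acc)
    PySem.Set.empty

def detect_material_from_product_alt (product_name : String) (product_context : Option (List (String × String))) : List String :=
  let name_lower := PySem.Str.lower product_name
  let found := pvFound name_lower
  (pvTable.filter (fun p => PySem.Set.contains found p.1)).map Prod.fst

-- ===== PRECONDITION & SPEC =====
def Spec_detect_material_from_product (product_name : String) (product_context : Option (List (String × String))) (out : List String) : Prop := out = detect_material_from_product_alt product_name product_context
instance (product_name : String) (product_context : Option (List (String × String))) (out : List String) : Decidable (Spec_detect_material_from_product product_name product_context out) := by unfold Spec_detect_material_from_product; infer_instance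

-- ===== CLAIM (what is proved, stated in full; the proofs are below) =====
def Claim_equal_detect_material_from_product : Prop := ∀ (product_name : String) (product_context : Option (List (String × String))), Dom_detect_material_from_product product_name product_context → Spec_detect_material_from_product product_name product_context (detect_material_from_product product_name product_context)

-- ===== LEMMAS AND PROOFS =====

-- membership through a foldl whose step adds (at most) elements characterised by P
lemma pv_mem_foldl_step (x : String) (g : Int → PySem.Set String → PySem.Set String)
    (P : Int → Prop) (hg : ∀ i a, x ∈ g i a ↔ x ∈ a ∨ P i) (l : List Int) (acc : PySem.Set String) :
    x ∈ l.foldl (fun a i => g i a) acc ↔ x ∈ acc ∨ ∃ i ∈ l, P i := by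
  induction l generalizing acc with
  | nil => simp
  | cons y ys ih =>
    simp only [List.foldl_cons, ih, hg, List.mem_cons]
    constructor
    · rintro ((h | h) | ⟨i, hi, hP⟩)
      · exact Or.inl h
      · exact Or.inr ⟨y, Or.inl rfl, h⟩
      · exact Or.inr ⟨i, Or.inr hi, hP⟩
    · rintro (h | ⟨i, (rfl | hi), hP⟩)
      · exact Or.inl (Or.inl h)
      · exact Or.inl (Or.inr hP)
      · exact Or.inr ⟨i, hi, hP⟩

-- one step of the inner loop
lemma pv_mem_match_add (x : String) (f : Int → Option String) (j : Int) (a : PySem.Set String) :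
    x ∈ (match f j with | some label => PySem.Set.add a label | none => a) ↔ x ∈ a ∨ f j = some x := by
  cases h : f j with
  | none => simp
  | some label =>
    simp [PySem.Set.mem_add, eq_comm]

-- membership in the substring-scan set: exactly the labels of keywords occurring in name_lower
set_option maxRecDepth 4096 in
lemma pv_mem_found (s : String) (x : String) :
    x ∈ pvFound s ↔ ∃ kw : String, PySem.Dict.get? pvKwToLabel kw = some x ∧ kw.toList <:+: s.toList := by
  unfold pvFound
  rw [pv_mem_foldl_step x _
      (fun i => ∃ j ∈ PySem.List.pyRange (i + 1) (min (i + 13) (PySem.Str.len s) + 1),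
        PySem.Dict.get? pvKwToLabel (PySem.Str.slice s (some i) (some j)) = some x)
      (fun i a => pv_mem_foldl_step x _
        (fun j => PySem.Dict.get? pvKwToLabel (PySem.Str.slice s (some i) (some j)) = some x)
        (fun j a => pv_mem_match_add x
          (fun j => PySem.Dict.get? pvKwToLabel (PySem.Str.slice s (some i) (some j))) j a) _ a)]
  simp only [PySem.Set.empty, List.not_mem_nil, false_or, PySem.List.mem_pyRange_one, PySem.Str.len_eq]
  constructor
  · rintro ⟨i, ⟨hi0, hin⟩, j, ⟨hij, hjn⟩, hget⟩
    refine ⟨PySem.Str.slice s (some i) (some j), hget, ?_⟩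
    have h0j : 0 ≤ j := by omega
    rw [PySem.Str.toList_slice, PySem.Chars.slice_eq_listSlice,
      PySem.List.slice_toNat _ hi0 h0j]
    exact ((List.take_prefix _ _).isInfix).trans ((List.drop_suffix _ _).isInfix)
  · rintro ⟨kw, hget, hinf⟩
    have hkwlen : 1 ≤ kw.toList.length ∧ kw.toList.length ≤ 13 := by
      have hmem : (kw, x) ∈ pvKwToLabel.items := PySem.Dict.mem_items_of_get?_eq_some _ hget
      have hitems : pvKwToLabel.items = pvPairs := by decide
      rw [hitems] at hmem
      have : ∀ p ∈ pvPairs, 1 ≤ p.1.toList.length ∧ p.1.toList.length ≤ 13 := by decide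
      exact this _ hmem
    rcases hinf with ⟨t, u, hs⟩
    have hdrop : s.toList.drop t.length = kw.toList ++ u := by
      rw [← hs, List.append_assoc, List.drop_left]
    have hlen : t.length + kw.toList.length + u.length = s.toList.length := by
      rw [← hs]; simp [List.length_append]; omega
    refine ⟨(t.length : Int), ⟨by positivity, by omega⟩,
      ((t.length : Int) + (kw.toList.length : Int)), ⟨by omega, by omega⟩, ?_⟩
    have hslice : (PySem.Str.slice s (some (t.length : Int))
        (some ((t.length : Int) + (kw.toList.length : Int)))).toList = kw.toList := by
      rw [PySem.Str.toList_slice, PySem.Chars.slice_eq_listSlice,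
        PySem.List.slice_natCast_add, hdrop, List.take_left]
    have : PySem.Str.slice s (some (t.length : Int))
        (some ((t.length : Int) + (kw.toList.length : Int))) = kw := by
      exact String.toList_inj.mp hslice
    rw [this]; exact hget

-- dict lookup characterised by the concrete pair list
set_option maxRecDepth 4096 in
lemma pv_get?_iff (kw lbl : String) :
    PySem.Dict.get? pvKwToLabel kw = some lbl ↔ (kw, lbl) ∈ pvPairs := by
  have hnodup : pvKwToLabel.keys.Nodup := by decide
  have hitems : pvKwToLabel.items = pvPairs := by decide
  rw [PySem.Dict.get?_eq_some_iff_mem_items _ _ _ hnodup, hitems]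

-- the per-label condition of B equals the per-label condition of A
lemma pv_cond_eq (s lbl : String) (group : List String)
    (hg : (pvPairs.filter (fun p => p.2 == lbl)).map Prod.fst = group) :
    PySem.Set.contains (pvFound s) lbl = group.any (fun kw => PySem.Str.isIn kw s) := by
  subst hg
  rw [Bool.eq_iff_iff, PySem.Set.contains_iff, pv_mem_found, List.any_eq_true]
  constructor
  · rintro ⟨kw, hget, hinf⟩
    refine ⟨kw, ?_, (PySem.Str.isIn_iff_infix _ _).mpr hinf⟩
    rw [List.mem_map]
    exact ⟨(kw, lbl), List.mem_filter.mpr ⟨(pv_get?_iff kw lbl).mp hget, by simp⟩, rfl⟩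
  · rintro ⟨kw, hkw, hin⟩
    rw [List.mem_map] at hkw
    rcases hkw with ⟨p, hp, rfl⟩
    rcases List.mem_filter.mp hp with ⟨hpp, hplbl⟩
    have : p = (p.1, lbl) := by
      have := beq_iff_eq.mp hplbl; exact Prod.ext rfl this
    rw [this] at hpp
    exact ⟨p.1, (pv_get?_iff p.1 lbl).mpr hpp, (PySem.Str.isIn_iff_infix _ _).mp hin⟩

lemma pv_appendIf (c : Bool) (xs : List String) (a : String) :
    (if c = true then xs ++ [a] else xs) = xs ++ (if c = true then [a] else []) := by
  cases c <;> simp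

lemma pv_mapFilterCons {α β : Type} (p : α → Bool) (f : α → β) (x : α) (l : List α) :
    ((x :: l).filter p).map f = (if p x then [f x] else []) ++ (l.filter p).map f := by
  by_cases h : p x <;> simp [h]

-- ===== VERDICT (by name: the statement is the Claim_ definition above) =====
theorem detect_material_from_product_spec : Claim_equal_detect_material_from_product := by
  intro product_name product_context _
  unfold Spec_detect_material_from_product detect_material_from_product
    detect_material_from_product_alt
  simp only [pvTable, pv_mapFilterCons, List.filter_nil, List.map_nil, List.append_nil]
  rw [pv_cond_eq _ "metal" ["metal", "aluminum", "steel", "iron", "copper"] (by decide),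
    pv_cond_eq _ "plastic" ["plastic", "polymer", "acrylic", "polycarbonate"] (by decide),
    pv_cond_eq _ "glass" ["glass", "mirror", "lens", "crystal"] (by decide),
    pv_cond_eq _ "wood" ["wood", "bamboo", "timber", "oak", "pine"] (by decide),
    pv_cond_eq _ "fabric" ["fabric", "cloth", "textile", "cotton", "polyester"] (by decide),
    pv_cond_eq _ "ceramic" ["ceramic", "porcelain", "pottery", "tile"] (by decide),
    pv_cond_eq _ "rubber" ["rubber", "silicone", "elastic"] (by decide),
    pv_cond_eq _ "leather" ["leather", "hide", "skin"] (by decide)]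
  simp only [pv_appendIf]
  simp only [List.nil_append, List.append_assoc]
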